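-- pv_equiv track=rewrite | github.com/Garl4nd/PyCalc | nparser/prime_factor.py | combs
-- ===== SOURCE A (Python) =====
-- def combs(nums,k):
-- 	if k==0:
-- 		yield [],nums
-- 	else:
-- 		for i,el in enumerate(nums):
-- 			rest=nums[i+1:]
-- 			old=nums[:i]
-- 			for res,compl in combs(rest,k-1):
-- 				yield [el]+res,old+compl
-- ===== SOURCE B (Python) =====
-- def _index_combinations(pool, r):
--     if r == 0:
--         return [[]]
--     if not pool:
--         return []
--     first, rest = pool[0], pool[1:]
--     return [[first] + c for c in _index_combinations(rest, r - 1)] + _index_combinations(rest, r)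
--
--
-- def combs(nums, k):
--     if k < 0:
--         return
--     n = len(nums)
--     for idx in _index_combinations(list(range(n)), k):
--         chosen = set(idx)
--         yield [nums[i] for i in idx], [nums[j] for j in range(n) if j not in chosen]
-- ===== Notes on version B (the rewrite author's own statement) =====
-- stated objective: alternative
-- what changed: B replaces A's recursion over list slices (building complements via nums[:i] + recursive complement) by an include/exclude enumeration of index combinations followed by indexing for the chosen elements and a positional filter for the complement.
import Mathlib
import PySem

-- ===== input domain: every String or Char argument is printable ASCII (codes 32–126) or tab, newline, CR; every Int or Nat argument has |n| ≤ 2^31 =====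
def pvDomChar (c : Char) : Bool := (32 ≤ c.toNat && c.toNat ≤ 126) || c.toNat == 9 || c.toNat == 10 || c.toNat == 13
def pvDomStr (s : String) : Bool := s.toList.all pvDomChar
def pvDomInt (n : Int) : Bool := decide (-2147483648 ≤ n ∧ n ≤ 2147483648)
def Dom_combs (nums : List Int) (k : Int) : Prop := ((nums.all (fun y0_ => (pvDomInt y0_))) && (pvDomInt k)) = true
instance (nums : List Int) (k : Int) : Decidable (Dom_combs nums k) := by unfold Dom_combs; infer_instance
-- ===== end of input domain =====

-- B enumerates index combinations (include/exclude recursion) and builds each pair by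
-- indexing/filtering positions, instead of A's recursion over list slices; objective: alternative.
-- Both Pythons are generators; equivalence is about the sequence of yielded pairs (as a list).

-- ===== PORT A =====
-- A's 'for i, el in enumerate(nums)' loop is transcribed as the structural recursion
-- combsGo over the remaining suffix, carrying old = nums[:i] (el = nums[i], rest = nums[i+1:]).
mutual
def combs (nums : List Int) (k : Int) : List (List Int × List Int) :=
  if k = 0 then [([], nums)]
  else combsGo k [] nums
termination_by (nums.length, 1)

def combsGo (k : Int) (old rem : List Int) : List (List Int × List Int) :=
  match rem with
  | [] => []
  | el :: rest =>
      ((combs rest (k-1)).map (fun p => (el :: p.1, old ++ p.2))) ++ combsGo k (old ++ [el]) rest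
termination_by (rem.length, 0)
end

-- ===== PORT B =====
-- _index_combinations: include/exclude recursion on the pool of positions
def combN (pool : List Nat) (r : Nat) : List (List Nat) :=
  match r, pool with
  | 0, _ => [[]]
  | _+1, [] => []
  | r'+1, x :: xs => ((combN xs r').map (fun c => x :: c)) ++ combN xs (r'+1)

def combs_alt (nums : List Int) (k : Int) : List (List Int × List Int) :=
  if k < 0 then []
  else
    let n := nums.length
    (combN (List.range n) k.toNat).map (fun idx =>
      let chosen := PySem.Set.ofList idx
      (idx.map (fun i => nums.getD i 0),        -- nums[i]: index always in range here
       ((List.range n).filter (fun j => !(PySem.Set.contains chosen j))).map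
         (fun j => nums.getD j 0)))

-- ===== PRECONDITION & SPEC =====
def Spec_combs (nums : List Int) (k : Int) (out : List (List Int × List Int)) : Prop := out = combs_alt nums k
instance (nums : List Int) (k : Int) (out : List (List Int × List Int)) : Decidable (Spec_combs nums k out) := by unfold Spec_combs; infer_instance

-- ===== CLAIM (what is proved, stated in full; the proofs are below) =====
def Claim_equal_combs : Prop := ∀ (nums : List Int) (k : Int), Dom_combs nums k → Spec_combs nums k (combs nums k)

-- ===== LEMMAS AND PROOFS =====

-- A-side characterisation
theorem combsGo_cons_old (k : Int) (y : Int) (old rem : List Int) :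
    combsGo k (y :: old) rem = (combsGo k old rem).map (fun p => (p.1, y :: p.2)) := by
  induction rem generalizing old with
  | nil => simp [combsGo]
  | cons el rest ih =>
      rw [combsGo, combsGo]
      have h : (y :: old) ++ [el] = y :: (old ++ [el]) := by simp
      rw [h, ih]
      simp [List.map_map, Function.comp_def]

theorem combs_zero (nums : List Int) : combs nums 0 = [([], nums)] := by
  rw [combs]; simp

theorem combs_nil (k : Int) :
    combs [] k = if k = 0 then [(([] : List Int), ([] : List Int))] else [] := by
  rw [combs]; split_ifs <;> simp [combsGo]

theorem combs_cons (x : Int) (xs : List Int) (k : Int) (hk : k ≠ 0) :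
    combs (x :: xs) k =
      ((combs xs (k-1)).map (fun p => (x :: p.1, p.2))) ++
      ((combs xs k).map (fun p => (p.1, x :: p.2))) := by
  have h1 : combs (x :: xs) k = combsGo k [] (x :: xs) := by rw [combs]; simp [hk]
  have h2 : combs xs k = combsGo k [] xs := by rw [combs]; simp [hk]
  rw [h1, combsGo]
  have h3 : ([] : List Int) ++ [x] = [x] := rfl
  rw [h3, show ([x] : List Int) = x :: [] from rfl, combsGo_cons_old, ← h2]
  simp

-- B-side characterisation
theorem mapGetD (L : List Int) :
    (List.range L.length).map (fun i => L.getD i 0) = L := by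
  induction L with
  | nil => simp
  | cons x xs ih =>
      rw [List.length_cons, List.range_succ_eq_map, List.map_cons, List.map_map]
      simp only [Function.comp_def, List.getD_cons_succ, List.getD_cons_zero]
      rw [ih]

theorem combN_map (f : Nat → Nat) (pool : List Nat) (r : Nat) :
    combN (pool.map f) r = (combN pool r).map (List.map f) := by
  induction pool generalizing r with
  | nil => cases r <;> simp [combN]
  | cons x xs ih =>
      cases r with
      | zero => simp [combN]
      | succ r' => simp [combN, ih, List.map_map, Function.comp_def]

theorem combs_alt_zero (L : List Int) : combs_alt L 0 = [([], L)] := by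
  have h := mapGetD L
  simp only [List.getD_eq_getElem?_getD] at h
  simp [combs_alt, combN, PySem.Set.ofList, h]

theorem combs_alt_nil (k : Int) :
    combs_alt [] k = if k = 0 then [(([] : List Int), ([] : List Int))] else [] := by
  unfold combs_alt
  by_cases hneg : k < 0
  · simp [hneg, show k ≠ 0 by omega]
  · by_cases hz : k = 0
    · subst hz; simp [combN]
    · have : ∃ m, k.toNat = m + 1 := ⟨k.toNat - 1, by omega⟩
      obtain ⟨m, hm⟩ := this
      simp [hneg, hz, hm, combN]

theorem combs_alt_cons (x : Int) (xs : List Int) (k : Int) (hk : k ≠ 0) :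
    combs_alt (x :: xs) k =
      ((combs_alt xs (k-1)).map (fun p => (x :: p.1, p.2))) ++
      ((combs_alt xs k).map (fun p => (p.1, x :: p.2))) := by
  by_cases hneg : k < 0
  · simp [combs_alt, hneg, show k - 1 < 0 by omega]
  · have hm : ∃ m, k.toNat = m + 1 := ⟨k.toNat - 1, by omega⟩
    obtain ⟨m, hm⟩ := hm
    have hm' : (k - 1).toNat = m := by omega
    have hneg' : ¬ (k - 1 < 0) := by omega
    unfold combs_alt
    simp only [if_neg hneg, if_neg hneg', hm, hm', List.length_cons]
    rw [List.range_succ_eq_map, combN, combN_map, combN_map, List.map_append]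
    simp only [List.map_map]
    congr 1
    · apply List.map_congr_left
      intro idx _
      simp only [Function.comp_def, Prod.mk.injEq]
      constructor
      · simp [List.map_map, Function.comp_def]
      · rw [List.filter_cons]
        have h0 : (!(PySem.Set.ofList (0 :: idx.map Nat.succ)).contains 0) = false := by
          simp [PySem.Set.mem_ofList]
        rw [h0]
        simp only [Bool.false_eq_true, if_false, List.filter_map, List.map_map]
        rw [List.filter_congr (l := List.range xs.length)
              (q := fun j => !(PySem.Set.ofList idx).contains j)
              (by intro j _; simp [PySem.Set.mem_ofList])]
        simp [Function.comp_def]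
    · apply List.map_congr_left
      intro idx _
      simp only [Function.comp_def, Prod.mk.injEq]
      constructor
      · simp [List.map_map, Function.comp_def]
      · rw [List.filter_cons]
        have h0 : (!(PySem.Set.ofList (idx.map Nat.succ)).contains 0) = true := by
          simp [PySem.Set.mem_ofList]
        rw [h0]
        simp only [if_true, List.filter_map]
        rw [List.filter_congr (l := List.range xs.length)
              (q := fun j => !(PySem.Set.ofList idx).contains j)
              (by intro j _; simp [PySem.Set.mem_ofList])]
        simp [Function.comp_def]

-- main equivalence
theorem combs_eq_alt (nums : List Int) : ∀ k, combs nums k = combs_alt nums k := by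
  induction nums with
  | nil => intro k; rw [combs_nil, combs_alt_nil]
  | cons x xs ih =>
      intro k
      by_cases hk : k = 0
      · subst hk; rw [combs_zero, combs_alt_zero]
      · rw [combs_cons x xs k hk, combs_alt_cons x xs k hk, ih, ih]

-- ===== VERDICT (by name: the statement is the Claim_ definition above) =====
theorem combs_spec : Claim_equal_combs := by
  intro nums k _
  exact combs_eq_alt nums k
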